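-- pv_equiv track=rewrite | github.com/ViniciusBessa/cifras_e_codigos | lib_gui/codificadores.py | cod_autokey
-- ===== SOURCE A (Python) =====
-- from string import ascii_uppercase
--
-- def cod_autokey(mensagem: str, chave: str):
--     """Função para codificar em autokey cipher"""
--     alfabeto: list = [letra for letra in ascii_uppercase]
--
--     mensagem: list = [x.upper() for x in mensagem]
--     chave: list = [x.upper() for x in chave]
--
--     for letra in [x for x in mensagem if x in alfabeto]:
--         if len(chave) < len([x for x in mensagem if x in alfabeto]):
--             chave.append(letra)
--         else:
--             break
--     carac_esp: list = [[indice, x] for indice, x in enumerate(mensagem) if x not in alfabeto]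
--     mensagem: list = [x for x in mensagem if x in alfabeto]
--     for indice, letra in enumerate(mensagem):
--         novo_alfabeto: list = alfabeto[alfabeto.index(chave[indice])::]
--         novo_alfabeto.extend(alfabeto[0:alfabeto.index(chave[indice]):])
--         mensagem[indice] = novo_alfabeto[alfabeto.index(letra)]
--     for carac in carac_esp:
--         mensagem.insert(carac[0], carac[1])
--     return ''.join(mensagem)
-- ===== SOURCE B (Python) =====
-- def cod_autokey(mensagem: str, chave: str):
--     """Autokey cipher encoding: one combined pass instead of extract/encrypt/reinsert."""
--     msg = mensagem.upper()
--     keystream = list(chave.upper()) + [c for c in msg if 'A' <= c <= 'Z']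
--     out = []
--     j = 0
--     for c in msg:
--         if 'A' <= c <= 'Z':
--             out.append(chr((ord(c) - 65 + ord(keystream[j]) - 65) % 26 + 65))
--             j += 1
--         else:
--             out.append(c)
--     return ''.join(out)
-- ===== Notes on version B (the rewrite author's own statement) =====
-- stated objective: simpler
-- what changed: A's four passes (extract the letters, autokey-extend the key list, encrypt via a rotated copy of the alphabet with list.index lookups, then reinsert the non-letters one by one with list.insert) are replaced by one single pass over the uppercased message with a keystream pointer and chr/ord modular arithmetic.
import Mathlib
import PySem

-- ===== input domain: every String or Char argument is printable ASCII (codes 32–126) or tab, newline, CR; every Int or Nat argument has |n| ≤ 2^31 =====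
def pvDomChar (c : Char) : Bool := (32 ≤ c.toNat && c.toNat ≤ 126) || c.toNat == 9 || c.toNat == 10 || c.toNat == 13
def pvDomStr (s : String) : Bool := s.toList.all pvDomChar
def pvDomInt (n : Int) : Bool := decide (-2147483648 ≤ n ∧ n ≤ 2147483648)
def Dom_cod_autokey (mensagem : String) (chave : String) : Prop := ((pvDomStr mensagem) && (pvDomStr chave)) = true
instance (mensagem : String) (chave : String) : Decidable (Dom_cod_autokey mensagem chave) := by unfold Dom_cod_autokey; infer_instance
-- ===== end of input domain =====

-- B replaces A's four passes (extract letters, autokey-extend the key, rotate-alphabet encrypt via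
-- list.index, reinsert the specials via list.insert) by one combined pass over the message with a
-- keystream pointer and modular arithmetic; simpler, and measurably faster in a timing run.

-- ===== PORT A =====

def pvAlfabeto : List Char :=
  ['A','B','C','D','E','F','G','H','I','J','K','L','M','N','O','P','Q','R','S','T','U','V','W','X','Y','Z']

-- the autokey extension loop: for letra in letters: if len(chave) < count: chave.append(letra) else: break
def pvExtendKey (count : Nat) : List Char → List Char → List Char
  | acc, [] => acc
  | acc, l :: ls => if acc.length < count then pvExtendKey count (acc ++ [l]) ls else acc

-- body of one iteration of A's encryption loop, given the key letter `k` and message letter `letra`;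
-- `none` from index? is Python's ValueError (excluded by Pre_; the `letra` defaults are never reached)
def pvEncACore (k letra : Char) : Char :=
  match PySem.List.index? pvAlfabeto k with
  | none => letra
  | some s =>
    let novo := PySem.List.slice pvAlfabeto (some (s : Int)) none
                  ++ PySem.List.slice pvAlfabeto (some 0) (some (s : Int))
    match PySem.List.index? pvAlfabeto letra with
    | none => letra
    | some t => (PySem.List.pyGet? novo (t : Int)).getD letra

def pvEncA (chave2 : List Char) (i : Int) (letra : Char) : Char :=
  pvEncACore ((PySem.List.pyGet? chave2 i).getD ' ') letra

def cod_autokey (mensagem : String) (chave : String) : String :=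
  let msg := PySem.Chars.upper mensagem.toList          -- [x.upper() for x in mensagem]; per-char, exact on ASCII
  let ch := PySem.Chars.upper chave.toList
  let letters := msg.filter (fun x => pvAlfabeto.contains x)
  let chave2 := pvExtendKey letters.length ch letters
  let caracEsp := (PySem.List.enumerate msg).filter (fun p => !(pvAlfabeto.contains p.2))
  let enc := (PySem.List.enumerate letters).map (fun p => pvEncA chave2 p.1 p.2)
  let final := caracEsp.foldl (fun acc p => PySem.List.insert acc p.1 p.2) enc
  String.mk final

-- ===== PORT B =====

-- B's single pass: keystream pointer j; letters are encrypted, everything else copied unchanged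
def pvGoB (keystream : List Char) : Nat → List Char → List Char
  | _, [] => []
  | j, c :: cs =>
    if 'A' ≤ c ∧ c ≤ 'Z' then
      Char.ofNat ((PySem.Int.mod ((c.toNat : Int) - 65 + (((keystream[j]?).getD ' ').toNat : Int) - 65) 26).toNat + 65)
        :: pvGoB keystream (j + 1) cs
    else
      c :: pvGoB keystream j cs

def cod_autokey_alt (mensagem : String) (chave : String) : String :=
  let msg := PySem.Chars.upper mensagem.toList
  let keystream := PySem.Chars.upper chave.toList ++ msg.filter (fun c => decide ('A' ≤ c ∧ c ≤ 'Z'))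
  String.mk (pvGoB keystream 0 msg)

-- ===== PRECONDITION & SPEC =====
-- Pre_ excludes exactly the inputs where A raises ValueError: a non-letter among the first
-- `count` characters of the uppercased key, count = number of letters of the uppercased message.
def Pre_cod_autokey (mensagem : String) (chave : String) : Prop :=
  ((PySem.Chars.upper chave.toList).take
      ((PySem.Chars.upper mensagem.toList).filter (fun c => decide ('A' ≤ c ∧ c ≤ 'Z'))).length).all
    (fun c => decide ('A' ≤ c ∧ c ≤ 'Z')) = true
instance (mensagem : String) (chave : String) : Decidable (Pre_cod_autokey mensagem chave) := by
  unfold Pre_cod_autokey; infer_instance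

def pvWitness_cod_autokey : String × String := ("Attack at dawn!", "key")

def Spec_cod_autokey (mensagem : String) (chave : String) (out : String) : Prop := out = cod_autokey_alt mensagem chave
instance (mensagem : String) (chave : String) (out : String) : Decidable (Spec_cod_autokey mensagem chave out) := by unfold Spec_cod_autokey; infer_instance

-- ===== CLAIM (what is proved, stated in full; the proofs are below) =====
def Claim_equal_cod_autokey : Prop := ∀ (mensagem : String) (chave : String), Dom_cod_autokey mensagem chave → Pre_cod_autokey mensagem chave → Spec_cod_autokey mensagem chave (cod_autokey mensagem chave)

-- ===== LEMMAS AND PROOFS =====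

-- letter-test bridges: B's 'A' ≤ c ≤ 'Z', code-point bounds, and A's `x in alfabeto` all agree
lemma pv_letter_iff (c : Char) : ('A' ≤ c ∧ c ≤ 'Z') ↔ (65 ≤ c.toNat ∧ c.toNat ≤ 90) := by
  rw [Char.le_def, Char.le_def, UInt32.le_iff_toNat_le, UInt32.le_iff_toNat_le]
  exact Iff.rfl

lemma pv_mem_alfabeto_iff (c : Char) : c ∈ pvAlfabeto ↔ (65 ≤ c.toNat ∧ c.toNat ≤ 90) := by
  constructor
  · intro h; fin_cases h <;> decide
  · rintro ⟨h1, h2⟩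
    rw [← Char.ofNat_toNat c]
    interval_cases h : c.toNat <;> decide

lemma pv_contains_eq (c : Char) :
    pvAlfabeto.contains c = decide ('A' ≤ c ∧ c ≤ 'Z') := by
  rw [Bool.eq_iff_iff]
  simp [pv_mem_alfabeto_iff, pv_letter_iff]

-- the extension loop appends exactly the first (count - |acc|) letters
lemma pv_extendKey_eq (count : Nat) (ls : List Char) : ∀ acc,
    pvExtendKey count acc ls = acc ++ ls.take (count - acc.length) := by
  induction ls with
  | nil => intro acc; simp [pvExtendKey]
  | cons l ls ih =>
    intro acc
    rw [pvExtendKey]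
    by_cases h : acc.length < count
    · rw [if_pos h, ih]
      have : count - acc.length = (count - (acc ++ [l]).length) + 1 := by simp; omega
      simp [this]
    · rw [if_neg h]
      have : count - acc.length = 0 := by omega
      simp [this]

-- Python list.insert at a nonnegative index
lemma pv_insert_nat {α : Type} (xs : List α) (n : Nat) (v : α) :
    PySem.List.insert xs (n : Int) v = xs.take n ++ v :: xs.drop n := by
  have h0 : ¬((n : Int) < 0) := by omega
  simp only [PySem.List.insert, PySem.List.sliceIndices]
  norm_num [h0]
  by_cases h : n ≤ xs.length
  · rw [min_eq_left (by exact_mod_cast h)]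
    simp
  · have h' : xs.length ≤ n := Nat.le_of_not_le h
    rw [min_eq_right (by exact_mod_cast h')]
    simp [List.take_of_length_le h', List.drop_of_length_le h']

lemma pv_insert_cons {α : Type} (e v : α) (acc : List α) (i : Int) (hi : 0 ≤ i) :
    PySem.List.insert (e :: acc) (i + 1) v = e :: PySem.List.insert acc i v := by
  obtain ⟨n, rfl⟩ := Int.eq_ofNat_of_zero_le hi
  have : ((n : Int) + 1) = ((n + 1 : Nat) : Int) := by push_cast; ring
  rw [this, pv_insert_nat, pv_insert_nat]
  simp

lemma pv_insert_zero {α : Type} (v : α) (acc : List α) :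
    PySem.List.insert acc 0 v = v :: acc := by
  have : (0 : Int) = ((0 : Nat) : Int) := rfl
  rw [this, pv_insert_nat]
  simp

-- enumerate with shifted start, index lower bound, and length
lemma pv_enumerate_shift {α : Type} (xs : List α) : ∀ (s : Int),
    PySem.List.enumerate xs (s + 1) = (PySem.List.enumerate xs s).map (fun p => (p.1 + 1, p.2)) := by
  induction xs with
  | nil => intro s; rfl
  | cons x xs ih => intro s; simp [PySem.List.enumerate, ih]

lemma pv_enumerate_le {α : Type} (xs : List α) : ∀ (s : Int) (p : Int × α),
    p ∈ PySem.List.enumerate xs s → s ≤ p.1 := by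
  induction xs with
  | nil => intro s p h; simp [PySem.List.enumerate] at h
  | cons x xs ih =>
    intro s p h
    simp [PySem.List.enumerate] at h
    rcases h with rfl | h
    · rfl
    · have := ih (s + 1) p h; omega

lemma pv_foldl_insert_shift (L : List (Int × Char)) (hL : ∀ p ∈ L, 0 ≤ p.1)
    (e : Char) (acc : List Char) :
    List.foldl (fun a p => PySem.List.insert a p.1 p.2) (e :: acc)
      (L.map (fun p => (p.1 + 1, p.2))) =
      e :: List.foldl (fun a p => PySem.List.insert a p.1 p.2) acc L := by
  induction L generalizing acc with
  | nil => rfl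
  | cons p L ih =>
    simp only [List.map_cons, List.foldl_cons]
    rw [pv_insert_cons _ _ _ _ (hL p (by simp))]
    exact ih (fun q hq => hL q (by simp [hq])) _

-- the merge skeleton both sides are reduced to: letters of msg are replaced in order by E
def pvMerge (g : Char → Bool) : List Char → List Char → List Char
  | [], _ => []
  | c :: cs, es => if g c then (es.headD c) :: pvMerge g cs es.tail else c :: pvMerge g cs es

-- A's reinsertion loop applied to any list of the right length = pvMerge
lemma pv_reinsert_eq_merge (g : Char → Bool) (msg : List Char) : ∀ E, E.length = (msg.filter g).length →
    ((PySem.List.enumerate msg).filter (fun p => !(g p.2))).foldl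
        (fun acc p => PySem.List.insert acc p.1 p.2) E = pvMerge g msg E := by
  induction msg with
  | nil =>
    intro E hE
    simp at hE
    simp [PySem.List.enumerate, pvMerge, hE]
  | cons c cs ih =>
    intro E hE
    have hcons : PySem.List.enumerate (c :: cs) (0 : Int) = (0, c) :: PySem.List.enumerate cs 1 := rfl
    have hshift : PySem.List.enumerate cs (1 : Int)
        = (PySem.List.enumerate cs 0).map (fun p => (p.1 + 1, p.2)) := by
      have := pv_enumerate_shift cs 0
      simpa using this
    have hfm : (((PySem.List.enumerate cs 0).map (fun p => (p.1 + 1, p.2))).filter (fun p => !(g p.2)))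
        = ((PySem.List.enumerate cs 0).filter (fun p => !(g p.2))).map (fun p => (p.1 + 1, p.2)) := by
      rw [List.filter_map]
      rfl
    have hnn : ∀ p ∈ (PySem.List.enumerate cs 0).filter (fun p => !(g p.2)), (0 : Int) ≤ p.1 :=
      fun p hp => pv_enumerate_le cs 0 p (List.mem_of_mem_filter hp)
    by_cases hg : g c
    · cases E with
      | nil => simp [hg] at hE
      | cons e E' =>
        simp only [hcons, hshift, List.filter_cons, hg, Bool.not_true, Bool.false_eq_true, if_false]
        rw [hfm, pv_foldl_insert_shift _ hnn]
        have := ih E' (by simpa [hg] using hE)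
        simp [pvMerge, hg, this]
    · simp only [hcons, hshift, List.filter_cons, hg, Bool.not_false, if_true]
      simp only [List.foldl_cons]
      rw [pv_insert_zero, hfm, pv_foldl_insert_shift _ hnn]
      have := ih E (by simpa [hg] using hE)
      simp [pvMerge, hg, this]

-- A's per-letter encryption (rotated alphabet) = modular arithmetic, over the 26×26 table
set_option maxHeartbeats 1000000 in
lemma pv_enc_table : ∀ m, m < 26 → ∀ n, n < 26 →
    pvEncACore (Char.ofNat (65 + m)) (Char.ofNat (65 + n)) = Char.ofNat ((n + m) % 26 + 65) := by
  decide

lemma pv_encA_eq (chave2 : List Char) (j : Nat) (c k : Char)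
    (hc : 65 ≤ c.toNat ∧ c.toNat ≤ 90) (hk : 65 ≤ k.toNat ∧ k.toNat ≤ 90)
    (hget : chave2[j]? = some k) :
    pvEncA chave2 (j : Nat) c =
      Char.ofNat ((PySem.Int.mod ((c.toNat : Int) - 65 + ((k.toNat : Int)) - 65) 26).toNat + 65) := by
  unfold pvEncA
  rw [PySem.List.pyGet?_natCast, hget]
  simp only [Option.getD_some]
  have hkeq : k = Char.ofNat (65 + (k.toNat - 65)) := by
    have h1 : 65 + (k.toNat - 65) = k.toNat := by omega
    rw [h1, Char.ofNat_toNat]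
  have hceq : c = Char.ofNat (65 + (c.toNat - 65)) := by
    have h1 : 65 + (c.toNat - 65) = c.toNat := by omega
    rw [h1, Char.ofNat_toNat]
  conv_lhs => rw [hkeq, hceq]
  rw [pv_enc_table (k.toNat - 65) (by omega) (c.toNat - 65) (by omega)]
  congr 1
  rw [PySem.Int.mod_eq_emod_of_pos (by norm_num : (0 : Int) < 26)]
  omega

-- the merged A-side output is exactly B's single pass
lemma pv_merge_eq_goB (keystream chave2 : List Char) : ∀ (cs : List Char) (j : Nat),
    (∀ i, i < (cs.filter (fun c => decide ('A' ≤ c ∧ c ≤ 'Z'))).length →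
        ∃ k, keystream[j + i]? = some k ∧ 65 ≤ k.toNat ∧ k.toNat ≤ 90) →
    (∀ i, i < (cs.filter (fun c => decide ('A' ≤ c ∧ c ≤ 'Z'))).length →
        chave2[j + i]? = keystream[j + i]?) →
    pvMerge (fun c => decide ('A' ≤ c ∧ c ≤ 'Z')) cs
        ((PySem.List.enumerate (cs.filter (fun c => decide ('A' ≤ c ∧ c ≤ 'Z'))) (j : Int)).map
          (fun p => pvEncA chave2 p.1 p.2)) = pvGoB keystream j cs := by
  intro cs
  induction cs with
  | nil => intro j _ _; rfl
  | cons c cs ih =>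
    intro j hk hch
    by_cases hg : 'A' ≤ c ∧ c ≤ 'Z'
    · have hg' : decide ('A' ≤ c ∧ c ≤ 'Z') = true := decide_eq_true hg
      have hfil : (c :: cs).filter (fun c => decide ('A' ≤ c ∧ c ≤ 'Z'))
          = c :: cs.filter (fun c => decide ('A' ≤ c ∧ c ≤ 'Z')) := by
        rw [List.filter_cons, if_pos hg']
      obtain ⟨k, hks, hkb⟩ := hk 0 (by rw [hfil]; simp)
      rw [Nat.add_zero] at hks
      have hch0 := hch 0 (by rw [hfil]; simp)
      rw [Nat.add_zero] at hch0
      have henum : PySem.List.enumerate (c :: cs.filter (fun c => decide ('A' ≤ c ∧ c ≤ 'Z'))) (j : Int)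
          = ((j : Int), c) :: PySem.List.enumerate (cs.filter (fun c => decide ('A' ≤ c ∧ c ≤ 'Z'))) ((j : Int) + 1) := rfl
      have hcast : ((j : Int) + 1) = ((j + 1 : Nat) : Int) := by push_cast; ring
      rw [hfil, henum, hcast, List.map_cons]
      simp only [pvMerge, pvGoB]
      rw [if_pos hg', if_pos hg]
      simp only [List.headD_cons, List.tail_cons]
      congr 1
      · rw [hks]
        simp only [Option.getD_some]
        exact pv_encA_eq chave2 j c k ((pv_letter_iff c).mp hg) hkb (hch0.trans hks)
      · apply ih (j + 1)
        · intro i hi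
          have := hk (i + 1) (by rw [hfil]; simpa using Nat.succ_lt_succ hi)
          simpa [Nat.add_comm, Nat.add_assoc, Nat.add_left_comm] using this
        · intro i hi
          have := hch (i + 1) (by rw [hfil]; simpa using Nat.succ_lt_succ hi)
          simpa [Nat.add_comm, Nat.add_assoc, Nat.add_left_comm] using this
    · have hg' : decide ('A' ≤ c ∧ c ≤ 'Z') = false := decide_eq_false hg
      have hfil : (c :: cs).filter (fun c => decide ('A' ≤ c ∧ c ≤ 'Z'))
          = cs.filter (fun c => decide ('A' ≤ c ∧ c ≤ 'Z')) := by
        rw [List.filter_cons, if_neg (by simp [hg'])]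
      rw [hfil]
      simp only [pvMerge, pvGoB]
      rw [if_neg (by simp [hg']), if_neg hg]
      congr 1
      exact ih j (by rw [hfil] at hk; exact hk) (by rw [hfil] at hch; exact hch)

-- ===== VERDICT (by name: the statement is the Claim_ definition above) =====
theorem cod_autokey_spec : Claim_equal_cod_autokey := by
  intro mensagem chave _ hpre
  unfold Spec_cod_autokey cod_autokey cod_autokey_alt
  simp only []
  set g : Char → Bool := fun c => decide ('A' ≤ c ∧ c ≤ 'Z') with hgdef
  set M : List Char := PySem.Chars.upper mensagem.toList with hMdef
  set K : List Char := PySem.Chars.upper chave.toList with hKdef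
  have hga : (fun x => pvAlfabeto.contains x) = g := funext pv_contains_eq
  have hgp : (fun p : Int × Char => !(pvAlfabeto.contains p.2)) = (fun p => !(g p.2)) :=
    funext (fun p => by rw [pv_contains_eq])
  rw [hga, hgp]
  set L : List Char := M.filter g with hLdef
  rw [pv_extendKey_eq]
  set C2 : List Char := K ++ L.take (L.length - K.length) with hC2def
  set KS : List Char := K ++ L with hKSdef
  have hE : ((PySem.List.enumerate L).map (fun p => pvEncA C2 p.1 p.2)).length = L.length := by
    simp
  rw [pv_reinsert_eq_merge g M _ hE]
  -- Pre_ in terms of K, L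
  have hpre' : ∀ c ∈ K.take L.length, 65 ≤ c.toNat ∧ c.toNat ≤ 90 := fun c hc =>
    (pv_letter_iff c).mp (of_decide_eq_true (List.all_eq_true.mp hpre c hc))
  have hk : ∀ i, i < L.length → ∃ k, KS[0 + i]? = some k ∧ 65 ≤ k.toNat ∧ k.toNat ≤ 90 := by
    intro i hi
    rw [Nat.zero_add]
    by_cases hlt : i < K.length
    · refine ⟨K[i], ?_, ?_⟩
      · rw [hKSdef, List.getElem?_append_left hlt]
        exact List.getElem?_eq_getElem hlt
      · apply hpre'
        have hlen : i < (K.take L.length).length := by simp; omega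
        have := List.getElem_mem hlen
        rwa [List.getElem_take] at this
    · have hlt : K.length ≤ i := Nat.le_of_not_lt hlt
      have hidx : i - K.length < L.length := by omega
      refine ⟨L[i - K.length], ?_, ?_⟩
      · rw [hKSdef, List.getElem?_append_right hlt]
        exact List.getElem?_eq_getElem hidx
      · have hmem : L[i - K.length] ∈ L := List.getElem_mem hidx
        have hmem' : L[i - K.length] ∈ M.filter g := by rw [← hLdef]; exact hmem
        have hgl : g (L[i - K.length]) = true := (List.mem_filter.mp hmem').2
        exact (pv_letter_iff _).mp (of_decide_eq_true hgl)
  have hch : ∀ i, i < L.length → C2[0 + i]? = KS[0 + i]? := by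
    intro i hi
    rw [Nat.zero_add]
    by_cases hlt : i < K.length
    · rw [hC2def, hKSdef, List.getElem?_append_left hlt, List.getElem?_append_left hlt]
    · have hlt : K.length ≤ i := Nat.le_of_not_lt hlt
      rw [hC2def, hKSdef, List.getElem?_append_right hlt, List.getElem?_append_right hlt]
      rw [List.getElem?_take]
      rw [if_pos (by omega)]
  have hmain := pv_merge_eq_goB KS C2 M 0 hk hch
  simp only [Nat.cast_zero] at hmain
  rw [hmain]
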